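-- pv_equiv track=rewrite | github.com/dinhthienan33/CS114.O21_UIT | Assignment/assign1/bai6_2.py | solve
-- ===== SOURCE A (Python) =====
-- def solve (a,b):
--     if(len(b)%2==0) or (len(a)!=len(b)):
--         return "NO"
--     for i in range(len(b)):
--         if(a.find(b[i])==-1):
--             return "NO"
--     if len(set(a))==len(set(b)):
--         return "YES"
--     return "NO"
-- ===== SOURCE B (Python) =====
-- def solve(a, b):
--     if len(b) % 2 == 0 or len(a) != len(b):
--         return "NO"
--     return "YES" if set(a) == set(b) else "NO"
-- ===== Notes on version B (the rewrite author's own statement) =====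
-- stated objective: simpler
-- what changed: Replaces the per-character membership loop (a repeated a.find scan per character of b) plus the separate distinct-count comparison with a single set-equality test, since subset plus equal cardinality is exactly set equality.
import Mathlib
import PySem

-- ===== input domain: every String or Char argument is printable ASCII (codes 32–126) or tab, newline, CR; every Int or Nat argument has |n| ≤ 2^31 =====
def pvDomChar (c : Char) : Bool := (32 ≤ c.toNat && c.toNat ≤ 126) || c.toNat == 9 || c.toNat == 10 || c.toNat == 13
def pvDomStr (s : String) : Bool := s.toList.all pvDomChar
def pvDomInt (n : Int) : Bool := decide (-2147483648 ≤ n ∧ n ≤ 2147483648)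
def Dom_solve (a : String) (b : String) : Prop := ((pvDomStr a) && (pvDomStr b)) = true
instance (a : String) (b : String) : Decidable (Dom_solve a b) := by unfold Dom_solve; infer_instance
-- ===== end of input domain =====

-- B replaces A's per-character a.find loop plus distinct-count comparison with one set-equality test (simpler; return value only).

-- ===== PORT A =====
-- the 'for i in range(len(b))' loop: walks b's characters in order, early-returns "NO" on a missing one
def solveLoop (al : List Char) : List Char → Option String
  | [] => none
  | c :: rest => if PySem.Chars.find al [c] = -1 then some "NO" else solveLoop al rest

def solve (a : String) (b : String) : String :=
  if b.toList.length % 2 == 0 || a.toList.length != b.toList.length then "NO"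
  else
    match solveLoop a.toList b.toList with
    | some r => r
    | none =>
      if (PySem.Set.ofList a.toList).length = (PySem.Set.ofList b.toList).length then "YES"
      else "NO"

-- ===== PORT B =====
def solve_alt (a : String) (b : String) : String :=
  if b.toList.length % 2 == 0 || a.toList.length != b.toList.length then "NO"
  else if PySem.Set.equal (PySem.Set.ofList a.toList) (PySem.Set.ofList b.toList) then "YES"
  else "NO"

-- ===== PRECONDITION & SPEC =====
def Spec_solve (a : String) (b : String) (out : String) : Prop := out = solve_alt a b
instance (a : String) (b : String) (out : String) : Decidable (Spec_solve a b out) := by unfold Spec_solve; infer_instance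

-- ===== CLAIM (what is proved, stated in full; the proofs are below) =====
def Claim_equal_solve : Prop := ∀ (a : String) (b : String), Dom_solve a b → Spec_solve a b (solve a b)

-- ===== LEMMAS AND PROOFS =====

-- a single-character search with str.find succeeds iff the character is a member
lemma find_singleton_eq_neg_one_iff (al : List Char) (c : Char) :
    PySem.Chars.find al [c] = -1 ↔ c ∉ al := by
  rw [PySem.Chars.find_eq_neg_one_iff]
  constructor
  · intro h hc
    obtain ⟨s, t, rfl⟩ := List.append_of_mem hc
    exact h ⟨s, t, by simp⟩
  · intro h hinf
    exact h (hinf.sublist.mem (by simp))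

-- A's loop returns none exactly when every character of b occurs in a
lemma solveLoop_eq_none_iff (al bl : List Char) :
    solveLoop al bl = none ↔ ∀ c ∈ bl, c ∈ al := by
  induction bl with
  | nil => simp [solveLoop]
  | cons c rest ih =>
    simp only [solveLoop]
    by_cases h : PySem.Chars.find al [c] = -1
    · simp [h, (find_singleton_eq_neg_one_iff al c).1 h]
    · simp [h, ih, (find_singleton_eq_neg_one_iff al c).not_left.1 h]

-- A's loop, when it returns early, returns some "NO"
lemma solveLoop_eq_some_iff (al bl : List Char) (r : String) :
    solveLoop al bl = some r → r = "NO" := by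
  induction bl with
  | nil => simp [solveLoop]
  | cons c rest ih =>
    simp only [solveLoop]
    split
    · intro h; exact (Option.some_inj.mp h).symm
    · exact ih

-- under b ⊆ a, equal distinct counts is exactly set equality
lemma card_eq_iff_set_equal (al bl : List Char) (hsub : ∀ c ∈ bl, c ∈ al) :
    ((PySem.Set.ofList al).length = (PySem.Set.ofList bl).length ↔
      PySem.Set.equal (PySem.Set.ofList al) (PySem.Set.ofList bl) = true) := by
  rw [PySem.Set.equal_iff]
  constructor
  · intro hlen x
    have hsub' : PySem.Set.ofList bl ⊆ PySem.Set.ofList al := by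
      intro y hy
      rw [PySem.Set.mem_ofList] at hy ⊢
      exact hsub y hy
    have hperm : (PySem.Set.ofList bl).Perm (PySem.Set.ofList al) :=
      ((PySem.Set.nodup_ofList bl).subperm hsub').perm_of_length_le (le_of_eq hlen)
    exact (hperm.mem_iff (a := x)).symm
  · intro hmem
    have hperm : (PySem.Set.ofList al).Perm (PySem.Set.ofList bl) :=
      (List.perm_ext_iff_of_nodup (PySem.Set.nodup_ofList al) (PySem.Set.nodup_ofList bl)).2 hmem
    exact hperm.length_eq

-- ===== VERDICT (by name: the statement is the Claim_ definition above) =====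
theorem solve_spec : Claim_equal_solve := by
  intro a b _
  unfold Spec_solve solve solve_alt
  by_cases hg : (b.toList.length % 2 == 0 || a.toList.length != b.toList.length) = true
  · rw [if_pos hg, if_pos hg]
  · rw [if_neg hg, if_neg hg]
    cases hloop : solveLoop a.toList b.toList with
    | none =>
      have hsub := (solveLoop_eq_none_iff a.toList b.toList).1 hloop
      have hiff := card_eq_iff_set_equal a.toList b.toList hsub
      by_cases hc : (PySem.Set.ofList a.toList).length = (PySem.Set.ofList b.toList).length
      · rw [if_pos hc, if_pos (hiff.1 hc)]
      · rw [if_neg hc, if_neg (fun h => hc (hiff.2 h))]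
    | some r =>
      have hr := solveLoop_eq_some_iff a.toList b.toList r hloop
      have hnsub : ¬ ∀ c ∈ b.toList, c ∈ a.toList := by
        intro h
        rw [(solveLoop_eq_none_iff a.toList b.toList).2 h] at hloop
        simp at hloop
      have hne : ¬ PySem.Set.equal (PySem.Set.ofList a.toList) (PySem.Set.ofList b.toList) = true := by
        intro h
        rw [PySem.Set.equal_iff] at h
        exact hnsub (fun c hc =>
          (PySem.Set.mem_ofList a.toList c).1 ((h c).2 ((PySem.Set.mem_ofList b.toList c).2 hc)))
      rw [if_neg hne, hr]
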